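-- pv_equiv track=rewrite | github.com/ValentinRapp/Advent-of-Code-2025 | day10/main.py | bidirectional_bfs
-- ===== SOURCE A (Python) =====
-- def press_button(state: tuple[bool, ...], button: set[int]) -> tuple[bool, ...]:
--     return tuple(not v if i in button else v for i, v in enumerate(state))
--
-- def bidirectional_bfs(initial: tuple[bool, ...], target: tuple[bool, ...], buttons: list[set[int]]) -> int:
--     if initial == target:
--         return 0
--
--     forward = {initial: 0}
--     backward = {target: 0}
--
--     forward_queue = [initial]
--     backward_queue = [target]
--
--     while forward_queue or backward_queue:
--         if forward_queue:
--             new_forward_queue = []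
--             for state in forward_queue:
--                 dist = forward[state]
--                 for button in buttons:
--                     new_state = press_button(state, button)
--
--                     if new_state in backward:
--                         return dist + 1 + backward[new_state]
--
--                     if new_state not in forward:
--                         forward[new_state] = dist + 1
--                         new_forward_queue.append(new_state)
--
--             forward_queue = new_forward_queue
--
--         if backward_queue:
--             new_backward_queue = []
--             for state in backward_queue:
--                 dist = backward[state]
--                 for button in buttons:
--                     new_state = press_button(state, button)
--
--                     if new_state in forward:
--                         return forward[new_state] + dist + 1
--
--                     if new_state not in backward:
--                         backward[new_state] = dist + 1
--                         new_backward_queue.append(new_state)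
--
--             backward_queue = new_backward_queue
--
--     return -1
-- ===== SOURCE B (Python) =====
-- def press_button(state, button):
--     return tuple(not v if i in button else v for i, v in enumerate(state))
--
-- def bidirectional_bfs(initial, target, buttons):
--     if initial == target:
--         return 0
--     visited = {initial: 0}
--     frontier = [initial]
--     while frontier:
--         new_frontier = []
--         for state in frontier:
--             dist = visited[state]
--             for button in buttons:
--                 ns = press_button(state, button)
--                 if ns == target:
--                     return dist + 1
--                 if ns not in visited:
--                     visited[ns] = dist + 1
--                     new_frontier.append(ns)
--         frontier = new_frontier
--     return -1
-- ===== Notes on version B (the rewrite author's own statement) =====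
-- stated objective: simpler
-- what changed: Replaces the bidirectional two-frontier meet-in-the-middle search (two distance dicts, alternating forward/backward level expansions, meeting rule dist_f+1+dist_b) with a plain single-frontier BFS from initial that returns the level at which target is first generated.
import Mathlib
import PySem

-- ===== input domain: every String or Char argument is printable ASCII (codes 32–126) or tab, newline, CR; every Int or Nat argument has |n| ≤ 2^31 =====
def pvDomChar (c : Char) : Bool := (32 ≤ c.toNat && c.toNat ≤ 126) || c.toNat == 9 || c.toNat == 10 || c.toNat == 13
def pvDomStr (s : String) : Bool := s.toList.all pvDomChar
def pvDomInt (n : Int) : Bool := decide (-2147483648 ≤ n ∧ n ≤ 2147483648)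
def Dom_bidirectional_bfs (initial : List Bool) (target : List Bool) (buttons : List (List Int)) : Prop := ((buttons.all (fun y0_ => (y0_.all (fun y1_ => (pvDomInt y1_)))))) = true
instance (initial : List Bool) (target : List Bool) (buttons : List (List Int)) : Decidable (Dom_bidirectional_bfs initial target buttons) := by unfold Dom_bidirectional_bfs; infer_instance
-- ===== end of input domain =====

-- B replaces A's bidirectional meet-in-the-middle search by a plain single-frontier BFS (simpler; same return value).

-- ===== PORT A =====
-- press_button: toggle the positions listed in `button`
def pvPress (state : List Bool) (button : List Int) : List Bool :=
  (PySem.List.enumerate state).map (fun p => if p.1 ∈ button then !p.2 else p.2)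

-- forward inner loop: `for button in buttons` of the forward block (early return = .error)
def pvScanFwd (bwd : PySem.Dict (List Bool) Int) (s : List Bool) (dist : Int)
    (fwd : PySem.Dict (List Bool) Int) (acc : List (List Bool)) :
    List (List Int) → Except Int (PySem.Dict (List Bool) Int × List (List Bool))
  | [] => .ok (fwd, acc)
  | b :: bl =>
    let ns := pvPress s b
    match bwd.get? ns with
    | some k => .error (dist + 1 + k)
    | none =>
      if fwd.contains ns then pvScanFwd bwd s dist fwd acc bl
      else pvScanFwd bwd s dist (fwd.insert ns (dist + 1)) (acc ++ [ns]) bl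

-- forward outer loop: `for state in forward_queue`
def pvExpandFwd (btns : List (List Int)) (bwd : PySem.Dict (List Bool) Int)
    (fwd : PySem.Dict (List Bool) Int) (acc : List (List Bool)) :
    List (List Bool) → Except Int (PySem.Dict (List Bool) Int × List (List Bool))
  | [] => .ok (fwd, acc)
  | s :: rest =>
    match pvScanFwd bwd s ((fwd.get? s).getD 0) fwd acc btns with
    | .error r => .error r
    | .ok (m', a') => pvExpandFwd btns bwd m' a' rest

-- backward inner loop (mirror image, early return value forward[ns] + dist + 1)
def pvScanBwd (fwd : PySem.Dict (List Bool) Int) (s : List Bool) (dist : Int)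
    (bwd : PySem.Dict (List Bool) Int) (acc : List (List Bool)) :
    List (List Int) → Except Int (PySem.Dict (List Bool) Int × List (List Bool))
  | [] => .ok (bwd, acc)
  | b :: bl =>
    let ns := pvPress s b
    match fwd.get? ns with
    | some k => .error (k + dist + 1)
    | none =>
      if bwd.contains ns then pvScanBwd fwd s dist bwd acc bl
      else pvScanBwd fwd s dist (bwd.insert ns (dist + 1)) (acc ++ [ns]) bl

-- backward outer loop
def pvExpandBwd (btns : List (List Int)) (fwd : PySem.Dict (List Bool) Int)
    (bwd : PySem.Dict (List Bool) Int) (acc : List (List Bool)) :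
    List (List Bool) → Except Int (PySem.Dict (List Bool) Int × List (List Bool))
  | [] => .ok (bwd, acc)
  | s :: rest =>
    match pvScanBwd fwd s ((bwd.get? s).getD 0) bwd acc btns with
    | .error r => .error r
    | .ok (m', a') => pvExpandBwd btns fwd m' a' rest

-- the `while forward_queue or backward_queue` loop; fuel only makes the loop total,
-- the correctness proof shows the supplied fuel is never exhausted
def pvLoopA (btns : List (List Int)) :
    Nat → PySem.Dict (List Bool) Int → PySem.Dict (List Bool) Int →
    List (List Bool) → List (List Bool) → Int
  | 0, _, _, _, _ => -1
  | fuel + 1, fwd, bwd, fq, bq =>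
    if fq = [] ∧ bq = [] then -1
    else
      match (if fq = [] then Except.ok (fwd, fq) else pvExpandFwd btns bwd fwd [] fq) with
      | .error r => r
      | .ok (fwd', fq') =>
        match (if bq = [] then Except.ok (bwd, bq) else pvExpandBwd btns fwd' bwd [] bq) with
        | .error r => r
        | .ok (bwd', bq') => pvLoopA btns fuel fwd' bwd' fq' bq'

def bidirectional_bfs (initial : List Bool) (target : List Bool) (buttons : List (List Int)) : Int :=
  if initial = target then 0
  else
    pvLoopA buttons (2 ^ (initial.length + 1) + 2 ^ (target.length + 1) + 2)
      ((PySem.Dict.empty).insert initial 0) ((PySem.Dict.empty).insert target 0)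
      [initial] [target]

-- ===== PORT B =====
-- single-frontier BFS: inner loop, early return dist+1 when target is generated
def pvScanB (tgt : List Bool) (s : List Bool) (dist : Int)
    (vis : PySem.Dict (List Bool) Int) (acc : List (List Bool)) :
    List (List Int) → Except Int (PySem.Dict (List Bool) Int × List (List Bool))
  | [] => .ok (vis, acc)
  | b :: bl =>
    let ns := pvPress s b
    if ns = tgt then .error (dist + 1)
    else
      if vis.contains ns then pvScanB tgt s dist vis acc bl
      else pvScanB tgt s dist (vis.insert ns (dist + 1)) (acc ++ [ns]) bl

def pvExpandB (btns : List (List Int)) (tgt : List Bool)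
    (vis : PySem.Dict (List Bool) Int) (acc : List (List Bool)) :
    List (List Bool) → Except Int (PySem.Dict (List Bool) Int × List (List Bool))
  | [] => .ok (vis, acc)
  | s :: rest =>
    match pvScanB tgt s ((vis.get? s).getD 0) vis acc btns with
    | .error r => .error r
    | .ok (m', a') => pvExpandB btns tgt m' a' rest

def pvLoopB (btns : List (List Int)) (tgt : List Bool) :
    Nat → PySem.Dict (List Bool) Int → List (List Bool) → Int
  | 0, _, _ => -1
  | fuel + 1, vis, q =>
    if q = [] then -1
    else
      match pvExpandB btns tgt vis [] q with
      | .error r => r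
      | .ok (vis', q') => pvLoopB btns tgt fuel vis' q'

def bidirectional_bfs_alt (initial : List Bool) (target : List Bool) (buttons : List (List Int)) : Int :=
  if initial = target then 0
  else
    pvLoopB buttons target (2 ^ (initial.length + 1) + 1)
      ((PySem.Dict.empty).insert initial 0) [initial]

-- ===== PRECONDITION & SPEC =====
def Spec_bidirectional_bfs (initial : List Bool) (target : List Bool) (buttons : List (List Int)) (out : Int) : Prop := out = bidirectional_bfs_alt initial target buttons
instance (initial : List Bool) (target : List Bool) (buttons : List (List Int)) (out : Int) : Decidable (Spec_bidirectional_bfs initial target buttons out) := by unfold Spec_bidirectional_bfs; infer_instance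

-- ===== CLAIM (what is proved, stated in full; the proofs are below) =====
def Claim_equal_bidirectional_bfs : Prop := ∀ (initial : List Bool) (target : List Bool) (buttons : List (List Int)), Dom_bidirectional_bfs initial target buttons → Spec_bidirectional_bfs initial target buttons (bidirectional_bfs initial target buttons)

-- ===== LEMMAS AND PROOFS =====

-- ---------- the state graph ----------
def pvNbr (btns : List (List Int)) (s u : List Bool) : Prop := ∃ b ∈ btns, pvPress s b = u

def pvReach (btns : List (List Int)) : Nat → List Bool → List Bool → Prop
  | 0, s, t => s = t
  | k + 1, s, t => ∃ u, pvNbr btns s u ∧ pvReach btns k u t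

-- exact BFS level of s seen from I
def pvED (btns : List (List Int)) (I s : List Bool) (k : Nat) : Prop :=
  pvReach btns k I s ∧ ∀ j < k, ¬ pvReach btns j I s

-- ---------- press is a length-preserving involution ----------
theorem pvPress_length (s : List Bool) (b : List Int) : (pvPress s b).length = s.length := by
  simp [pvPress, PySem.List.length_enumerate]

theorem pvPress_aux (b : List Int) : ∀ (l : List Bool) (st : Int),
    (PySem.List.enumerate ((PySem.List.enumerate l st).map
        (fun p => if p.1 ∈ b then !p.2 else p.2)) st).map
      (fun p => if p.1 ∈ b then !p.2 else p.2) = l := by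
  intro l
  induction l with
  | nil => intro st; simp [PySem.List.enumerate_nil]
  | cons x xs ih =>
    intro st
    by_cases hst : st ∈ b <;>
      simp [PySem.List.enumerate_cons, hst, ih (st + 1)]

theorem pvPress_invol (s : List Bool) (b : List Int) : pvPress (pvPress s b) b = s := by
  simpa [pvPress] using pvPress_aux b s 0

theorem pvNbr_symm {btns : List (List Int)} {s u : List Bool} (h : pvNbr btns s u) : pvNbr btns u s := by
  obtain ⟨b, hb, hp⟩ := h
  exact ⟨b, hb, by rw [← hp, pvPress_invol]⟩

-- ---------- reachability toolbox ----------
theorem pvReach_comp {btns : List (List Int)} {a b : Nat} {s m t : List Bool}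
    (h1 : pvReach btns a s m) (h2 : pvReach btns b m t) : pvReach btns (a + b) s t := by
  induction a generalizing s with
  | zero => simpa [pvReach] using h1 ▸ h2
  | succ a ih =>
    obtain ⟨u, hn, hr⟩ := h1
    have he : a + 1 + b = (a + b) + 1 := by omega
    rw [he]
    exact ⟨u, hn, ih hr⟩

theorem pvReach_snoc {btns : List (List Int)} {k : Nat} {s t : List Bool} :
    pvReach btns (k + 1) s t ↔ ∃ u, pvReach btns k s u ∧ pvNbr btns u t := by
  induction k generalizing s with
  | zero =>
    constructor
    · rintro ⟨u, hn, hr⟩; exact ⟨s, rfl, by simpa [pvReach] using hr ▸ hn⟩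
    · rintro ⟨u, hr, hn⟩; exact ⟨t, by simpa [pvReach] using hr ▸ hn, rfl⟩
  | succ k ih =>
    constructor
    · rintro ⟨u, hn, hr⟩
      obtain ⟨w, hw1, hw2⟩ := (ih (s := u)).1 hr
      exact ⟨w, ⟨u, hn, hw1⟩, hw2⟩
    · rintro ⟨u, ⟨w, hn, hr⟩, hnb⟩
      exact ⟨w, hn, (ih (s := w)).2 ⟨u, hr, hnb⟩⟩

theorem pvReach_symm {btns : List (List Int)} {k : Nat} {s t : List Bool}
    (h : pvReach btns k s t) : pvReach btns k t s := by
  induction k generalizing t with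
  | zero => simpa [pvReach] using h.symm
  | succ k ih =>
    obtain ⟨u, hr, hn⟩ := pvReach_snoc.1 h
    exact ⟨u, pvNbr_symm hn, ih hr⟩

theorem pvReach_length {btns : List (List Int)} {k : Nat} {s t : List Bool}
    (h : pvReach btns k s t) : t.length = s.length := by
  induction k generalizing s with
  | zero => simp [pvReach] at h; simp [h]
  | succ k ih =>
    obtain ⟨u, ⟨b, _, hp⟩, hr⟩ := h
    rw [ih hr, ← hp, pvPress_length]

theorem pvReach_split {btns : List (List Int)} {k : Nat} {s t : List Bool}
    (h : pvReach btns k s t) (a b : Nat) (hab : a + b = k) :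
    ∃ m, pvReach btns a s m ∧ pvReach btns b m t := by
  induction a generalizing s k with
  | zero => exact ⟨s, rfl, by simpa [← hab] using h⟩
  | succ a ih =>
    subst hab
    rw [show a + 1 + b = (a + b) + 1 from by omega] at h
    obtain ⟨u, hn, hr⟩ := h
    obtain ⟨m, hm1, hm2⟩ := ih (k := a + b) hr rfl
    exact ⟨m, ⟨u, hn, hm1⟩, hm2⟩

theorem pvED_of_reach {btns : List (List Int)} {I s : List Bool} {k : Nat}
    (h : pvReach btns k I s) : ∃ j ≤ k, pvED btns I s j := by
  induction k using Nat.strong_induction_on with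
  | _ k ih =>
    by_cases hmin : ∀ j < k, ¬ pvReach btns j I s
    · exact ⟨k, le_refl k, h, hmin⟩
    · push_neg at hmin
      obtain ⟨j, hj, hr⟩ := hmin
      obtain ⟨i, hi, hED⟩ := ih j hj hr
      exact ⟨i, le_of_lt (lt_of_le_of_lt hi hj), hED⟩

theorem pvED_unique {btns : List (List Int)} {I s : List Bool} {j k : Nat}
    (hj : pvED btns I s j) (hk : pvED btns I s k) : j = k := by
  rcases lt_trichotomy j k with h | h | h
  · exact absurd hj.1 (hk.2 j h)
  · exact h
  · exact absurd hk.1 (hj.2 k h)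

theorem pvED_pred {btns : List (List Int)} {I u : List Bool} {k : Nat}
    (h : pvED btns I u (k + 1)) : ∃ s, pvED btns I s k ∧ pvNbr btns s u := by
  obtain ⟨s, hr, hn⟩ := pvReach_snoc.1 h.1
  obtain ⟨j, hjk, hED⟩ := pvED_of_reach hr
  rcases lt_or_eq_of_le hjk with hlt | heq
  · exact absurd (pvReach_snoc.2 ⟨s, hED.1, hn⟩) (h.2 (j + 1) (by omega))
  · exact ⟨s, heq ▸ hED, hn⟩

-- every level below the exact distance of T is inhabited
theorem pvED_level_nonempty {btns : List (List Int)} {I T : List Bool} {d : Nat}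
    (hD : pvED btns I T d) {k : Nat} (hk : k ≤ d) : ∃ m, pvED btns I m k := by
  obtain ⟨m, hm1, hm2⟩ := pvReach_split hD.1 k (d - k) (by omega)
  obtain ⟨j, hjk, hED⟩ := pvED_of_reach hm1
  have hd : ¬ pvReach btns (j + (d - k)) I T → False := fun h => h (pvReach_comp hED.1 hm2)
  have : d ≤ j + (d - k) := by
    by_contra hlt
    exact hd (hD.2 _ (by omega))
  have : j = k := by omega
  exact ⟨m, this ▸ hED⟩

-- ---------- counting: at most 2^n distinct bool lists of length n ----------
theorem pvCard_boolvec (L : List (List Bool)) (n : Nat) (hnd : L.Nodup)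
    (hlen : ∀ x ∈ L, x.length = n) : L.length ≤ 2 ^ n := by
  classical
  have hmap : (L.map (fun (x : List Bool) (i : Fin n) => x.getD i false)).Nodup := by
    refine List.Nodup.map_on ?_ hnd
    intro x hx y hy hxy
    refine List.ext_getElem (by rw [hlen x hx, hlen y hy]) ?_
    intro i h1 h2
    have hi : i < n := by rw [← hlen x hx]; exact h1
    have := congrFun hxy ⟨i, hi⟩
    simpa [List.getD_eq_getElem?_getD, List.getElem?_eq_getElem, h1, h2] using this
  have hle := hmap.length_le_card
  simpa [Fintype.card_fun] using hle

-- if every level up to N is inhabited, there are more than N distinct states of length I.length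
theorem pvLevels_bound {btns : List (List Int)} {I : List Bool} {N : Nat}
    (h : ∀ k, k ≤ N → ∃ m, pvED btns I m k) : N < 2 ^ I.length := by
  classical
  set L := (List.range (N + 1)).pmap
      (fun k (hk : k ≤ N) => Classical.choose (h k hk))
      (fun k hk => by simpa using Nat.lt_succ_iff.mp (List.mem_range.mp hk)) with hL
  have hspec : ∀ k (hk : k ≤ N), pvED btns I (Classical.choose (h k hk)) k :=
    fun k hk => Classical.choose_spec (h k hk)
  have hnd : L.Nodup := by
    refine List.Nodup.pmap ?_ (List.nodup_range)
    intro a ha b hb hab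
    exact pvED_unique (hab ▸ hspec a ha) (hspec b hb)
  have hlen : ∀ x ∈ L, x.length = I.length := by
    intro x hx
    rw [hL] at hx
    obtain ⟨k, hk, hkx⟩ := List.mem_pmap.mp hx
    exact hkx ▸ pvReach_length (hspec k (by simpa using Nat.lt_succ_iff.mp (List.mem_range.mp hk))).1
  have := pvCard_boolvec L I.length hnd hlen
  have hLlen : L.length = N + 1 := by simp [hL]
  omega

theorem pvED_lt_card {btns : List (List Int)} {I T : List Bool} {d : Nat}
    (hD : pvED btns I T d) : d < 2 ^ I.length := by
  exact pvLevels_bound (fun k hk => pvED_level_nonempty hD hk)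

theorem pvExists_empty_level (btns : List (List Int)) (I : List Bool) :
    ∃ k ≤ 2 ^ I.length, ∀ m, ¬ pvED btns I m k := by
  by_contra hc
  push_neg at hc
  have : ∀ k, k ≤ 2 ^ I.length → ∃ m, pvED btns I m k := fun k hk => hc k hk
  exact absurd (pvLevels_bound this) (by omega)

-- ---------- generic level expansion (proof-side only) ----------
def pvScanG (trig : Int → List Bool → Option Int) (s : List Bool) (dist : Int)
    (mine : PySem.Dict (List Bool) Int) (acc : List (List Bool)) :
    List (List Int) → Except Int (PySem.Dict (List Bool) Int × List (List Bool))
  | [] => .ok (mine, acc)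
  | b :: bl =>
    let ns := pvPress s b
    match trig dist ns with
    | some r => .error r
    | none =>
      if mine.contains ns then pvScanG trig s dist mine acc bl
      else pvScanG trig s dist (mine.insert ns (dist + 1)) (acc ++ [ns]) bl

def pvExpandG (trig : Int → List Bool → Option Int) (btns : List (List Int))
    (mine : PySem.Dict (List Bool) Int) (acc : List (List Bool)) :
    List (List Bool) → Except Int (PySem.Dict (List Bool) Int × List (List Bool))
  | [] => .ok (mine, acc)
  | s :: rest =>
    match pvScanG trig s ((mine.get? s).getD 0) mine acc btns with
    | .error r => .error r
    | .ok (m', a') => pvExpandG trig btns m' a' rest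

theorem pvScanFwd_eq (bwd : PySem.Dict (List Bool) Int) (s : List Bool) (dist : Int)
    (fwd : PySem.Dict (List Bool) Int) (acc : List (List Bool)) (bl : List (List Int)) :
    pvScanFwd bwd s dist fwd acc bl
      = pvScanG (fun d ns => (bwd.get? ns).map (fun k => d + 1 + k)) s dist fwd acc bl := by
  induction bl generalizing fwd acc with
  | nil => rfl
  | cons b bl ih =>
    simp only [pvScanFwd, pvScanG]
    cases h : bwd.get? (pvPress s b) with
    | some k => simp [h]
    | none =>
      simp only [h, Option.map_none]
      split <;> exact ih _ _

theorem pvExpandFwd_eq (btns : List (List Int)) (bwd fwd : PySem.Dict (List Bool) Int)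
    (acc : List (List Bool)) (rest : List (List Bool)) :
    pvExpandFwd btns bwd fwd acc rest
      = pvExpandG (fun d ns => (bwd.get? ns).map (fun k => d + 1 + k)) btns fwd acc rest := by
  induction rest generalizing fwd acc with
  | nil => rfl
  | cons x rest ih =>
    simp only [pvExpandFwd, pvExpandG, pvScanFwd_eq]
    split <;> simp_all

theorem pvScanBwd_eq (fwd : PySem.Dict (List Bool) Int) (s : List Bool) (dist : Int)
    (bwd : PySem.Dict (List Bool) Int) (acc : List (List Bool)) (bl : List (List Int)) :
    pvScanBwd fwd s dist bwd acc bl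
      = pvScanG (fun d ns => (fwd.get? ns).map (fun k => k + d + 1)) s dist bwd acc bl := by
  induction bl generalizing bwd acc with
  | nil => rfl
  | cons b bl ih =>
    simp only [pvScanBwd, pvScanG]
    cases h : fwd.get? (pvPress s b) with
    | some k => simp [h]
    | none =>
      simp only [h, Option.map_none]
      split <;> exact ih _ _

theorem pvExpandBwd_eq (btns : List (List Int)) (fwd bwd : PySem.Dict (List Bool) Int)
    (acc : List (List Bool)) (rest : List (List Bool)) :
    pvExpandBwd btns fwd bwd acc rest
      = pvExpandG (fun d ns => (fwd.get? ns).map (fun k => k + d + 1)) btns bwd acc rest := by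
  induction rest generalizing bwd acc with
  | nil => rfl
  | cons x rest ih =>
    simp only [pvExpandBwd, pvExpandG, pvScanBwd_eq]
    split <;> simp_all

theorem pvScanB_eq (tgt : List Bool) (s : List Bool) (dist : Int)
    (vis : PySem.Dict (List Bool) Int) (acc : List (List Bool)) (bl : List (List Int)) :
    pvScanB tgt s dist vis acc bl
      = pvScanG (fun d ns => if ns = tgt then some (d + 1) else none) s dist vis acc bl := by
  induction bl generalizing vis acc with
  | nil => rfl
  | cons b bl ih =>
    simp only [pvScanB, pvScanG]
    by_cases h : pvPress s b = tgt
    · simp [h]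
    · simp only [h, if_false]
      split <;> exact ih _ _

theorem pvExpandB_eq (btns : List (List Int)) (tgt : List Bool)
    (vis : PySem.Dict (List Bool) Int) (acc : List (List Bool)) (rest : List (List Bool)) :
    pvExpandB btns tgt vis acc rest
      = pvExpandG (fun d ns => if ns = tgt then some (d + 1) else none) btns vis acc rest := by
  induction rest generalizing vis acc with
  | nil => rfl
  | cons x rest ih =>
    simp only [pvExpandB, pvExpandG, pvScanB_eq]
    split <;> simp_all

-- ---------- invariants ----------
-- partial invariant while expanding level t
def pvPInv (btns : List (List Int)) (I : List Bool) (t : Nat)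
    (mine : PySem.Dict (List Bool) Int) (acc : List (List Bool)) : Prop :=
  (∀ s k, pvED btns I s k → k ≤ t → mine.get? s = some (k : Int)) ∧
  (∀ u ∈ acc, mine.get? u = some ((t : Int) + 1)) ∧
  (∀ s v, mine.get? s = some v → (∃ k ≤ t, pvED btns I s k ∧ v = (k : Int)) ∨ (s ∈ acc ∧ v = (t : Int) + 1)) ∧
  acc.Nodup ∧
  (∀ u ∈ acc, pvED btns I u (t + 1))

-- dict invariant between iterations: exactly the states at level ≤ t, mapped to their level
def pvDInv (btns : List (List Int)) (I : List Bool) (t : Nat)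
    (d : PySem.Dict (List Bool) Int) : Prop :=
  (∀ s k, pvED btns I s k → k ≤ t → d.get? s = some (k : Int)) ∧
  (∀ s v, d.get? s = some v → ∃ k ≤ t, pvED btns I s k ∧ v = (k : Int))

-- queue invariant: exactly the states at level t
def pvQInv (btns : List (List Int)) (I : List Bool) (t : Nat) (q : List (List Bool)) : Prop :=
  q.Nodup ∧ ∀ s, s ∈ q ↔ pvED btns I s t

-- ---------- the master expansion lemmas ----------
theorem pvScanG_master (btns : List (List Int)) (I : List Bool) (t : Nat)
    (trig : Int → List Bool → Option Int) (s : List Bool) (hs : pvED btns I s t) :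
    ∀ (bl : List (List Int)), (∀ b ∈ bl, b ∈ btns) →
    ∀ (mine : PySem.Dict (List Bool) Int) (acc : List (List Bool)), pvPInv btns I t mine acc →
    (∃ u v, pvNbr btns s u ∧ trig (t : Int) u = some v ∧
        pvScanG trig s (t : Int) mine acc bl = .error v) ∨
    (∃ m' a', pvScanG trig s (t : Int) mine acc bl = .ok (m', a') ∧ pvPInv btns I t m' a' ∧
        (∀ x ∈ acc, x ∈ a') ∧
        (∀ u, pvED btns I u (t + 1) → (∃ b ∈ bl, pvPress s b = u) → u ∈ a') ∧
        (∀ b ∈ bl, trig (t : Int) (pvPress s b) = none)) := by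
  classical
  intro bl
  induction bl with
  | nil =>
    intro _ mine acc hP
    right
    exact ⟨mine, acc, rfl, hP, fun x hx => hx, by simp, by simp⟩
  | cons b bl ih =>
    intro hbl mine acc hP
    have hbmem : b ∈ btns := hbl b List.mem_cons_self
    have hNbr : pvNbr btns s (pvPress s b) := ⟨b, hbmem, rfl⟩
    obtain ⟨hP1, hP2, hP3, hP4, hP5⟩ := hP
    cases htr : trig (t : Int) (pvPress s b) with
    | some v =>
      left
      exact ⟨pvPress s b, v, hNbr, htr, by simp [pvScanG, htr]⟩
    | none =>
      by_cases hct : mine.contains (pvPress s b)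
      · have hred : pvScanG trig s (t : Int) mine acc (b :: bl)
            = pvScanG trig s (t : Int) mine acc bl := by
          simp [pvScanG, htr, hct]
        rw [hred]
        rcases ih (fun x hx => hbl x (List.mem_cons_of_mem _ hx)) mine acc
            ⟨hP1, hP2, hP3, hP4, hP5⟩ with
          ⟨u, v, hn, ht, hres⟩ | ⟨m', a', hres, hP', hmono, hcov, hnt⟩
      -- error propagates
        · exact Or.inl ⟨u, v, hn, ht, hres⟩
        · right
          refine ⟨m', a', hres, hP', hmono, ?_, ?_⟩
          · rintro u hu ⟨b', hb', hpb⟩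
            rcases List.mem_cons.mp hb' with rfl | hb'tl
            · have hg : (mine.get? (pvPress s b')).isSome = true := by
                rw [← PySem.Dict.contains_eq_isSome_get?]; exact hct
              obtain ⟨v, hv⟩ := Option.isSome_iff_exists.mp hg
              rcases hP3 _ _ hv with ⟨k, hk, hEDk, _⟩ | ⟨hacc, _⟩
              · exact absurd (pvED_unique hu (hpb ▸ hEDk)) (by omega)
              · exact hmono _ (hpb ▸ hacc)
            · exact hcov u hu ⟨b', hb'tl, hpb⟩
          · intro b' hb'
            rcases List.mem_cons.mp hb' with rfl | hb'tl
            · exact htr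
            · exact hnt b' hb'tl
      · -- fresh state: inserted at level t+1
        have hgnone : mine.get? (pvPress s b) = none := by
          rw [Option.eq_none_iff_forall_ne_some]
          intro v hv
          rw [PySem.Dict.contains_eq_isSome_get?, hv] at hct
          simp at hct
        have hred : pvScanG trig s (t : Int) mine acc (b :: bl)
            = pvScanG trig s (t : Int) (mine.insert (pvPress s b) ((t : Int) + 1))
                (acc ++ [pvPress s b]) bl := by
          simp [pvScanG, htr, hct]
        have hED : pvED btns I (pvPress s b) (t + 1) := by
          have hr : pvReach btns (t + 1) I (pvPress s b) := pvReach_snoc.2 ⟨s, hs.1, hNbr⟩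
          obtain ⟨j, hj, hEDj⟩ := pvED_of_reach hr
          have hnle : ¬ j ≤ t := by
            intro hle
            rw [hP1 _ _ hEDj hle] at hgnone
            cases hgnone
          have : j = t + 1 := by omega
          exact this ▸ hEDj
        have hnacc : pvPress s b ∉ acc := by
          intro hmem
          rw [hP2 _ hmem] at hgnone
          cases hgnone
        have hP' : pvPInv btns I t (mine.insert (pvPress s b) ((t : Int) + 1))
            (acc ++ [pvPress s b]) := by
          refine ⟨?_, ?_, ?_, ?_, ?_⟩
          · intro s' k hEDk hk
            rw [PySem.Dict.get?_insert]
            split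
            · rename_i hss
              exact absurd (pvED_unique (hss ▸ hEDk) hED) (by omega)
            · exact hP1 _ _ hEDk hk
          · intro u hu
            rcases List.mem_append.mp hu with hu1 | hu2
            · rw [PySem.Dict.get?_insert]
              split
              · rename_i hss
                exact absurd (hss ▸ hu1) hnacc
              · exact hP2 _ hu1
            · have : u = pvPress s b := by simpa using hu2
              rw [this, PySem.Dict.get?_insert_self]
          · intro s' v hv
            rw [PySem.Dict.get?_insert] at hv
            split at hv
            · rename_i hss
              exact Or.inr ⟨by rw [hss]; exact List.mem_append.mpr (Or.inr (by simp)),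
                by injection hv with h; omega⟩
            · rcases hP3 _ _ hv with ⟨k, hk, hEDk, hvk⟩ | ⟨hacc, hvk⟩
              · exact Or.inl ⟨k, hk, hEDk, hvk⟩
              · exact Or.inr ⟨List.mem_append.mpr (Or.inl hacc), hvk⟩
          · refine List.Nodup.append hP4 (List.nodup_singleton _) ?_
            intro a ha hb
            have hab : a = pvPress s b := by simpa using hb
            exact hnacc (hab ▸ ha)
          · intro u hu
            rcases List.mem_append.mp hu with hu1 | hu2
            · exact hP5 _ hu1
            · have : u = pvPress s b := by simpa using hu2
              exact this ▸ hED
        rw [hred]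
        rcases ih (fun x hx => hbl x (List.mem_cons_of_mem _ hx)) _ _ hP' with
          ⟨u, v, hn, ht, hres⟩ | ⟨m', a', hres, hPf, hmono, hcov, hnt⟩
        · exact Or.inl ⟨u, v, hn, ht, hres⟩
        · right
          refine ⟨m', a', hres, hPf, ?_, ?_, ?_⟩
          · intro x hx
            exact hmono x (List.mem_append.mpr (Or.inl hx))
          · rintro u hu ⟨b', hb', hpb⟩
            rcases List.mem_cons.mp hb' with rfl | hb'tl
            · exact hmono _ (List.mem_append.mpr (Or.inr (by simp [hpb])))
            · exact hcov u hu ⟨b', hb'tl, hpb⟩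
          · intro b' hb'
            rcases List.mem_cons.mp hb' with rfl | hb'tl
            · exact htr
            · exact hnt b' hb'tl

theorem pvExpandG_master (btns : List (List Int)) (I : List Bool) (t : Nat)
    (trig : Int → List Bool → Option Int) :
    ∀ (rest : List (List Bool)), (∀ s ∈ rest, pvED btns I s t) →
    ∀ (mine : PySem.Dict (List Bool) Int) (acc : List (List Bool)), pvPInv btns I t mine acc →
    (∃ s u v, pvED btns I s t ∧ pvNbr btns s u ∧ trig (t : Int) u = some v ∧
        pvExpandG trig btns mine acc rest = .error v) ∨
    (∃ m' a', pvExpandG trig btns mine acc rest = .ok (m', a') ∧ pvPInv btns I t m' a' ∧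
        (∀ x ∈ acc, x ∈ a') ∧
        (∀ u, pvED btns I u (t + 1) → (∃ s ∈ rest, pvNbr btns s u) → u ∈ a') ∧
        (∀ s ∈ rest, ∀ b ∈ btns, trig (t : Int) (pvPress s b) = none)) := by
  intro rest
  induction rest with
  | nil =>
    intro _ mine acc hP
    right
    exact ⟨mine, acc, rfl, hP, fun x hx => hx, by simp, by simp⟩
  | cons s rest ih =>
    intro hrest mine acc hP
    have hs : pvED btns I s t := hrest s List.mem_cons_self
    have hgs : (mine.get? s).getD 0 = (t : Int) := by
      rw [hP.1 s t hs (le_refl t)]; rfl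
    rcases pvScanG_master btns I t trig s hs btns (fun b hb => hb) mine acc hP with
      ⟨u, v, hn, ht, hserr⟩ | ⟨m1, a1, hsok, hP1, hmono1, hcov1, hnt1⟩
    · left
      refine ⟨s, u, v, hs, hn, ht, ?_⟩
      simp [pvExpandG, hgs, hserr]
    · have hred : pvExpandG trig btns mine acc (s :: rest)
          = pvExpandG trig btns m1 a1 rest := by
        simp [pvExpandG, hgs, hsok]
      rw [hred]
      rcases ih (fun x hx => hrest x (List.mem_cons_of_mem _ hx)) m1 a1 hP1 with
        ⟨s', u, v, hs', hn, ht, hres⟩ | ⟨m', a', hres, hPf, hmono, hcov, hnt⟩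
      · exact Or.inl ⟨s', u, v, hs', hn, ht, hres⟩
      · right
        refine ⟨m', a', hres, hPf, fun x hx => hmono x (hmono1 x hx), ?_, ?_⟩
        · rintro u hu ⟨s', hs', hnb⟩
          rcases List.mem_cons.mp hs' with rfl | hstl
          · obtain ⟨b, hb, hpb⟩ := hnb
            exact hmono _ (hcov1 u hu ⟨b, hb, hpb⟩)
          · exact hcov u hu ⟨s', hstl, hnb⟩
        · intro s' hs' b hb
          rcases List.mem_cons.mp hs' with rfl | hstl
          · exact hnt1 b hb
          · exact hnt s' hstl b hb

-- whole-phase corollary: from full level-t state to full level-(t+1) state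
theorem pvPhase (btns : List (List Int)) (I : List Bool) (t : Nat)
    (trig : Int → List Bool → Option Int)
    (mine : PySem.Dict (List Bool) Int) (q : List (List Bool))
    (hD : pvDInv btns I t mine) (hQ : pvQInv btns I t q) :
    (∃ s u v, pvED btns I s t ∧ pvNbr btns s u ∧ trig (t : Int) u = some v ∧
        pvExpandG trig btns mine [] q = .error v) ∨
    (∃ m' a', pvExpandG trig btns mine [] q = .ok (m', a') ∧
        pvDInv btns I (t + 1) m' ∧ pvQInv btns I (t + 1) a' ∧
        (∀ s u, pvED btns I s t → pvNbr btns s u → trig (t : Int) u = none)) := by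
  have hP : pvPInv btns I t mine [] := by
    refine ⟨hD.1, by simp, ?_, List.nodup_nil, by simp⟩
    intro s v hv
    obtain ⟨k, hk, hEDk, hvk⟩ := hD.2 s v hv
    exact Or.inl ⟨k, hk, hEDk, hvk⟩
  rcases pvExpandG_master btns I t trig q (fun s hsq => (hQ.2 s).1 hsq) mine [] hP with
    ⟨s, u, v, hs, hn, ht, hres⟩ | ⟨m', a', hres, hPf, _, hcov, hnt⟩
  · exact Or.inl ⟨s, u, v, hs, hn, ht, hres⟩
  · right
    refine ⟨m', a', hres, ⟨?_, ?_⟩, ⟨hPf.2.2.2.1, ?_⟩, ?_⟩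
    · intro s k hEDk hk
      rcases Nat.lt_or_ge k (t + 1) with hlt | hge
      · exact hPf.1 _ _ hEDk (by omega)
      · have hkt : k = t + 1 := by omega
        subst hkt
        obtain ⟨s0, hs0, hnb⟩ := pvED_pred hEDk
        have : s ∈ a' := hcov s hEDk ⟨s0, (hQ.2 s0).2 hs0, hnb⟩
        rw [hPf.2.1 _ this]
        push_cast
        ring_nf
    · intro s v hv
      rcases hPf.2.2.1 _ _ hv with ⟨k, hk, hEDk, hvk⟩ | ⟨hacc, hvk⟩
      · exact ⟨k, by omega, hEDk, hvk⟩
      · exact ⟨t + 1, le_refl _, hPf.2.2.2.2 _ hacc, by rw [hvk]; push_cast; ring⟩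
    · intro s
      constructor
      · exact fun hsa => hPf.2.2.2.2 _ hsa
      · intro hED
        obtain ⟨s0, hs0, hnb⟩ := pvED_pred hED
        exact hcov s hED ⟨s0, (hQ.2 s0).2 hs0, hnb⟩
    · intro s u hsED hnb
      obtain ⟨b, hb, hpb⟩ := hnb
      exact hpb ▸ hnt s ((hQ.2 s).2 hsED) b hb

-- skipped phase (empty queue): invariants still advance one level
theorem pvSkip (btns : List (List Int)) (I : List Bool) (t : Nat)
    (mine : PySem.Dict (List Bool) Int)
    (hD : pvDInv btns I t mine) (hQ : pvQInv btns I t ([] : List (List Bool))) :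
    pvDInv btns I (t + 1) mine ∧ pvQInv btns I (t + 1) ([] : List (List Bool)) := by
  have hempty : ∀ m, ¬ pvED btns I m t := by
    intro m hm
    exact (by simp : m ∉ ([] : List (List Bool))) ((hQ.2 m).2 hm)
  have hempty' : ∀ m, ¬ pvED btns I m (t + 1) := by
    intro m hm
    obtain ⟨s0, hs0, _⟩ := pvED_pred hm
    exact hempty s0 hs0
  refine ⟨⟨?_, ?_⟩, List.nodup_nil, ?_⟩
  · intro s k hEDk hk
    rcases Nat.lt_or_ge k (t + 1) with hlt | hge
    · exact hD.1 _ _ hEDk (by omega)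
    · have hk1 : k = t + 1 := by omega
      exact absurd (hk1 ▸ hEDk) (hempty' s)
  · intro s v hv
    obtain ⟨k, hk, hEDk, hvk⟩ := hD.2 s v hv
    exact ⟨k, by omega, hEDk, hvk⟩
  · intro s
    simp only [List.not_mem_nil, false_iff]
    exact hempty' s

-- ---------- loop lemmas, port A ----------
theorem pvLoopA_reach (btns : List (List Int)) (I T : List Bool) (d : Nat)
    (hD : pvED btns I T d) (hd1 : 1 ≤ d) :
    ∀ (fuel t : Nat), 2 * t + 1 ≤ d → d ≤ fuel + t →
    ∀ fwd bwd fq bq,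
      pvDInv btns I t fwd → pvQInv btns I t fq →
      pvDInv btns T t bwd → pvQInv btns T t bq →
      pvLoopA btns fuel fwd bwd fq bq = (d : Int) := by
  have hDsym : pvED btns T I d :=
    ⟨pvReach_symm hD.1, fun j hj hr => hD.2 j hj (pvReach_symm hr)⟩
  intro fuel
  induction fuel with
  | zero => intro t ht hft; omega
  | succ f ih =>
    intro t ht hft fwd bwd fq bq hDF hQF hDB hQB
    have hfqne : fq ≠ [] := by
      obtain ⟨m, hm⟩ := pvED_level_nonempty hD (show t ≤ d by omega)
      intro hq
      exact (by simp [hq] : m ∉ fq) ((hQF.2 m).2 hm)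
    have hbqne : bq ≠ [] := by
      obtain ⟨m, hm⟩ := pvED_level_nonempty hDsym (show t ≤ d by omega)
      intro hq
      exact (by simp [hq] : m ∉ bq) ((hQB.2 m).2 hm)
    simp only [pvLoopA]
    rw [if_neg (fun h => hfqne h.1), if_neg hfqne, pvExpandFwd_eq]
    rcases pvPhase btns I t (fun dd ns => (bwd.get? ns).map (fun k => dd + 1 + k)) fwd fq hDF hQF with
      ⟨sx, u, v, hs, hn, htr, hres⟩ | ⟨fwd', fq', hresF, hDF', hQF', hntF⟩
    · -- forward meeting: the returned value is d
      have htr' : (bwd.get? u).map (fun k => (t : Int) + 1 + k) = some v := htr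
      split
      · rename_i r heq
        rw [hres] at heq
        injection heq with hvr
        subst hvr
        cases hbg : bwd.get? u with
        | none => rw [hbg] at htr'; cases htr'
        | some k0 =>
          rw [hbg] at htr'
          simp only [Option.map_some, Option.some.injEq] at htr'
          obtain ⟨k, hk, hEDTu, hk0⟩ := hDB.2 u k0 hbg
          have hreach : pvReach btns (t + 1 + k) I T :=
            pvReach_comp (pvReach_snoc.2 ⟨sx, hs.1, hn⟩) (pvReach_symm hEDTu.1)
          have hge : d ≤ t + 1 + k := by
            by_contra hlt
            exact hD.2 _ (by omega) hreach
          rw [← htr', hk0]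
          push_cast
          omega
      · rename_i heq
        rw [hres] at heq
        cases heq
    · -- no forward meeting: d is not 2t+1
      have hodd : d ≠ 2 * t + 1 := by
        intro hdeq
        obtain ⟨m, hm1, hm2⟩ := pvReach_split hD.1 (t + 1) t (by omega)
        obtain ⟨u0, hru0, hnb0⟩ := pvReach_snoc.1 hm1
        obtain ⟨js, hjs, hEDs⟩ := pvED_of_reach hru0
        obtain ⟨jt, hjt, hEDt⟩ := pvED_of_reach (pvReach_symm hm2)
        have hjs_eq : js = t := by
          by_contra hne
          have hreach : pvReach btns (js + 1 + jt) I T :=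
            pvReach_comp (pvReach_snoc.2 ⟨u0, hEDs.1, hnb0⟩) (pvReach_symm hEDt.1)
          exact hD.2 _ (by omega) hreach
        have hsome : ¬ ((bwd.get? m).map (fun k => (t : Int) + 1 + k) = none) := by
          rw [hDB.1 m jt hEDt hjt]
          simp
        exact hsome (hntF u0 m (hjs_eq ▸ hEDs) hnb0)
      split
      · rename_i heq
        rw [hresF] at heq
        cases heq
      · rename_i fwd2 fq2 heq
        rw [hresF] at heq
        cases heq
        -- backward phase at level t, with the forward dict already at level t+1
        rw [if_neg hbqne, pvExpandBwd_eq]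
        rcases pvPhase btns T t (fun dd ns => (fwd'.get? ns).map (fun k => k + dd + 1)) bwd bq hDB hQB with
          ⟨sx, u, v, hs, hn, htr, hres⟩ | ⟨bwd', bq', hresB, hDB', hQB', hntB⟩
        · have htr' : (fwd'.get? u).map (fun k => k + (t : Int) + 1) = some v := htr
          split
          · rename_i r heq2
            rw [hres] at heq2
            injection heq2 with hvr
            subst hvr
            cases hfg : fwd'.get? u with
            | none => rw [hfg] at htr'; cases htr'
            | some k0 =>
              rw [hfg] at htr'
              simp only [Option.map_some, Option.some.injEq] at htr'
              obtain ⟨k, hk, hEDIu, hk0⟩ := hDF'.2 u k0 hfg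
              have hreach : pvReach btns (k + 1 + t) I T :=
                pvReach_comp (pvReach_snoc.2 ⟨u, hEDIu.1, pvNbr_symm hn⟩)
                  (pvReach_symm hs.1)
              have hge : d ≤ k + 1 + t := by
                by_contra hlt
                exact hD.2 _ (by omega) hreach
              rw [← htr', hk0]
              push_cast
              omega
          · rename_i heq2
            rw [hres] at heq2
            cases heq2
        · have heven : d ≠ 2 * t + 2 := by
            intro hdeq
            obtain ⟨m, hm1, hm2⟩ := pvReach_split hD.1 (t + 1) (t + 1) (by omega)
            obtain ⟨u0, hru0, hnb0⟩ := pvReach_snoc.1 (pvReach_symm hm2)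
            obtain ⟨js, hjs, hEDs⟩ := pvED_of_reach hru0
            obtain ⟨jm, hjm, hEDm⟩ := pvED_of_reach hm1
            have hjs_eq : js = t := by
              by_contra hne
              have hreach : pvReach btns (jm + 1 + js) I T :=
                pvReach_comp (pvReach_snoc.2 ⟨m, hEDm.1, pvNbr_symm hnb0⟩)
                  (pvReach_symm hEDs.1)
              exact hD.2 _ (by omega) hreach
            have hsome : ¬ ((fwd'.get? m).map (fun k => k + (t : Int) + 1) = none) := by
              rw [hDF'.1 m jm hEDm hjm]
              simp
            exact hsome (hntB u0 m (hjs_eq ▸ hEDs) hnb0)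
          split
          · rename_i heq2
            rw [hresB] at heq2
            cases heq2
          · rename_i bwd2 bq2 heq2
            rw [hresB] at heq2
            cases heq2
            exact ih (t + 1) (by omega) (by omega) fwd' bwd' fq' bq' hDF' hQF' hDB' hQB'

theorem pvLoopA_unreach (btns : List (List Int)) (I T : List Bool)
    (hU : ∀ k, ¬ pvReach btns k I T) (kI kT : Nat)
    (hkI : ∀ m, ¬ pvED btns I m kI) (hkT : ∀ m, ¬ pvED btns T m kT) :
    ∀ (fuel t : Nat), max kI kT + 1 ≤ fuel + t →
    ∀ fwd bwd fq bq,
      pvDInv btns I t fwd → pvQInv btns I t fq →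
      pvDInv btns T t bwd → pvQInv btns T t bq →
      pvLoopA btns fuel fwd bwd fq bq = -1 := by
  intro fuel
  induction fuel with
  | zero => intro t _ fwd bwd fq bq _ _ _ _; rfl
  | succ f ih =>
    intro t hft fwd bwd fq bq hDF hQF hDB hQB
    by_cases hboth : fq = [] ∧ bq = []
    · obtain ⟨hfq, hbq⟩ := hboth
      subst hfq
      subst hbq
      simp [pvLoopA]
    · simp only [pvLoopA]
      rw [if_neg hboth]
      have hfwd : ∃ fwd' fq',
          (if fq = [] then Except.ok (fwd, fq)
           else pvExpandFwd btns bwd fwd [] fq) = .ok (fwd', fq') ∧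
          pvDInv btns I (t + 1) fwd' ∧ pvQInv btns I (t + 1) fq' := by
        by_cases hfq : fq = []
        · subst hfq
          obtain ⟨hD', hQ'⟩ := pvSkip btns I t fwd hDF hQF
          exact ⟨fwd, [], by simp, hD', hQ'⟩
        · rw [if_neg hfq, pvExpandFwd_eq]
          rcases pvPhase btns I t (fun dd ns => (bwd.get? ns).map (fun k => dd + 1 + k)) fwd fq hDF hQF with
            ⟨sx, u, v, hs, hn, htr, _⟩ | ⟨fwd', fq', hres, hD', hQ', _⟩
          · exfalso
            have htr' : (bwd.get? u).map (fun k => (t : Int) + 1 + k) = some v := htr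
            cases hbg : bwd.get? u with
            | none => rw [hbg] at htr'; cases htr'
            | some k0 =>
              obtain ⟨k, _, hEDTu, _⟩ := hDB.2 u k0 hbg
              exact hU (t + 1 + k)
                (pvReach_comp (pvReach_snoc.2 ⟨sx, hs.1, hn⟩) (pvReach_symm hEDTu.1))
          · exact ⟨fwd', fq', hres, hD', hQ'⟩
      obtain ⟨fwd', fq', hresF, hDF', hQF'⟩ := hfwd
      split
      · rename_i heq
        rw [hresF] at heq
        cases heq
      · rename_i fwd2 fq2 heq
        rw [hresF] at heq
        cases heq
        have hbwd : ∃ bwd' bq',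
            (if bq = [] then Except.ok (bwd, bq)
             else pvExpandBwd btns fwd' bwd [] bq) = .ok (bwd', bq') ∧
            pvDInv btns T (t + 1) bwd' ∧ pvQInv btns T (t + 1) bq' := by
          by_cases hbq : bq = []
          · subst hbq
            obtain ⟨hD', hQ'⟩ := pvSkip btns T t bwd hDB hQB
            exact ⟨bwd, [], by simp, hD', hQ'⟩
          · rw [if_neg hbq, pvExpandBwd_eq]
            rcases pvPhase btns T t (fun dd ns => (fwd'.get? ns).map (fun k => k + dd + 1)) bwd bq hDB hQB with
              ⟨sx, u, v, hs, hn, htr, _⟩ | ⟨bwd', bq', hres, hD', hQ', _⟩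
            · exfalso
              have htr' : (fwd'.get? u).map (fun k => k + (t : Int) + 1) = some v := htr
              cases hfg : fwd'.get? u with
              | none => rw [hfg] at htr'; cases htr'
              | some k0 =>
                obtain ⟨k, _, hEDIu, _⟩ := hDF'.2 u k0 hfg
                exact hU (k + 1 + t)
                  (pvReach_comp (pvReach_snoc.2 ⟨u, hEDIu.1, pvNbr_symm hn⟩)
                    (pvReach_symm hs.1))
            · exact ⟨bwd', bq', hres, hD', hQ'⟩
        obtain ⟨bwd', bq', hresB, hDB', hQB'⟩ := hbwd
        split
        · rename_i heq2
          rw [hresB] at heq2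
          cases heq2
        · rename_i bwd2 bq2 heq2
          rw [hresB] at heq2
          cases heq2
          exact ih (t + 1) (by omega) fwd' bwd' fq' bq' hDF' hQF' hDB' hQB'

-- ---------- loop lemmas, port B ----------
theorem pvLoopB_reach (btns : List (List Int)) (I T : List Bool) (d : Nat)
    (hD : pvED btns I T d) (hd1 : 1 ≤ d) :
    ∀ (fuel t : Nat), t + 1 ≤ d → d ≤ fuel + t →
    ∀ vis q, pvDInv btns I t vis → pvQInv btns I t q →
      pvLoopB btns T fuel vis q = (d : Int) := by
  intro fuel
  induction fuel with
  | zero => intro t ht hft; omega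
  | succ f ih =>
    intro t ht hft vis q hDv hQv
    have hqne : q ≠ [] := by
      obtain ⟨m, hm⟩ := pvED_level_nonempty hD (show t ≤ d by omega)
      intro hq
      exact (by simp [hq] : m ∉ q) ((hQv.2 m).2 hm)
    simp only [pvLoopB]
    rw [if_neg hqne, pvExpandB_eq]
    rcases pvPhase btns I t (fun dd ns => if ns = T then some (dd + 1) else none) vis q hDv hQv with
      ⟨sx, u, v, hs, hn, htr, hres⟩ | ⟨vis', q', hres, hD', hQ', hnt⟩
    · have htr' : (if u = T then some ((t : Int) + 1) else none) = some v := htr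
      split
      · rename_i r heq
        rw [hres] at heq
        injection heq with hvr
        subst hvr
        by_cases hu : u = T
        · rw [if_pos hu] at htr'
          have hreach : pvReach btns (t + 1) I T :=
            pvReach_snoc.2 ⟨sx, hs.1, hu ▸ hn⟩
          have hge : d ≤ t + 1 := by
            by_contra hlt
            exact hD.2 _ (by omega) hreach
          injection htr' with hv
          rw [← hv]
          push_cast
          omega
        · rw [if_neg hu] at htr'; cases htr'
      · rename_i heq
        rw [hres] at heq
        cases heq
    · have hlt : t + 1 < d := by
        rcases Nat.lt_or_ge (t + 1) d with h | h
        · exact h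
        · exfalso
          have hdt : d = t + 1 := by omega
          obtain ⟨s0, hs0, hnb⟩ := pvED_pred (hdt ▸ hD)
          have hnone : (if T = T then some ((t : Int) + 1) else none) = none :=
            hnt s0 T hs0 hnb
          simp at hnone
      split
      · rename_i heq
        rw [hres] at heq
        cases heq
      · rename_i vis2 q2 heq
        rw [hres] at heq
        cases heq
        exact ih (t + 1) (by omega) (by omega) vis' q' hD' hQ'

theorem pvLoopB_unreach (btns : List (List Int)) (I T : List Bool)
    (hU : ∀ k, ¬ pvReach btns k I T) (kI : Nat) (hkI : ∀ m, ¬ pvED btns I m kI) :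
    ∀ (fuel t : Nat), kI + 1 ≤ fuel + t →
    ∀ vis q, pvDInv btns I t vis → pvQInv btns I t q →
      pvLoopB btns T fuel vis q = -1 := by
  intro fuel
  induction fuel with
  | zero => intro t _ vis q _ _; rfl
  | succ f ih =>
    intro t hft vis q hDv hQv
    by_cases hq : q = []
    · subst hq
      simp [pvLoopB]
    · simp only [pvLoopB]
      rw [if_neg hq, pvExpandB_eq]
      rcases pvPhase btns I t (fun dd ns => if ns = T then some (dd + 1) else none) vis q hDv hQv with
        ⟨sx, u, v, hs, hn, htr, _⟩ | ⟨vis', q', hres, hD', hQ', _⟩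
      · exfalso
        have htr' : (if u = T then some ((t : Int) + 1) else none) = some v := htr
        by_cases hu : u = T
        · exact hU (t + 1) (pvReach_snoc.2 ⟨sx, hs.1, hu ▸ hn⟩)
        · rw [if_neg hu] at htr'; cases htr'
      · split
        · rename_i heq
          rw [hres] at heq
          cases heq
        · rename_i vis2 q2 heq
          rw [hres] at heq
          cases heq
          exact ih (t + 1) (by omega) vis' q' hD' hQ'

-- minimal element of a nonempty set of naturals
theorem pvNat_min {P : Nat → Prop} (h : ∃ k, P k) : ∃ d, P d ∧ ∀ j < d, ¬ P j := by
  classical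
  obtain ⟨k, hk⟩ := h
  induction k using Nat.strong_induction_on with
  | _ k ih =>
    by_cases hm : ∀ j < k, ¬ P j
    · exact ⟨k, hk, hm⟩
    · push_neg at hm
      obtain ⟨j, hj, hPj⟩ := hm
      exact ih j hj hPj

-- initial invariants
theorem pvInit_DInv (btns : List (List Int)) (I : List Bool) :
    pvDInv btns I 0 ((PySem.Dict.empty).insert I 0) := by
  classical
  constructor
  · intro s k hED hk
    have hk0 : k = 0 := by omega
    subst hk0
    have hIs : I = s := hED.1
    subst hIs
    rw [PySem.Dict.get?_insert_self]
    norm_num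
  · intro s v hv
    rw [PySem.Dict.get?_insert] at hv
    split at hv
    · rename_i hsI
      subst hsI
      refine ⟨0, le_refl 0, ⟨rfl, by omega⟩, by injection hv with h; omega⟩
    · rw [PySem.Dict.get?_empty] at hv
      cases hv

theorem pvInit_QInv (btns : List (List Int)) (I : List Bool) :
    pvQInv btns I 0 [I] := by
  refine ⟨List.nodup_singleton _, ?_⟩
  intro s
  constructor
  · intro hs
    have : s = I := by simpa using hs
    subst this
    exact ⟨rfl, by omega⟩
  · intro hED
    have hIs : I = s := hED.1
    simp [hIs]

-- ===== VERDICT (by name: the statement is the Claim_ definition above) =====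
theorem bidirectional_bfs_spec : Claim_equal_bidirectional_bfs := by
  unfold Claim_equal_bidirectional_bfs
  intro I T btns _
  unfold Spec_bidirectional_bfs
  by_cases hIT : I = T
  · simp [bidirectional_bfs, bidirectional_bfs_alt, hIT]
  · simp only [bidirectional_bfs, bidirectional_bfs_alt, if_neg hIT]
    have h2I : (2 : Nat) ^ (I.length + 1) = 2 * 2 ^ I.length := by
      rw [pow_succ]; ring
    have h2T : (2 : Nat) ^ (T.length + 1) = 2 * 2 ^ T.length := by
      rw [pow_succ]; ring
    by_cases hreach : ∃ k, pvReach btns k I T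
    · obtain ⟨d, hPd, hmin⟩ := pvNat_min hreach
      have hD : pvED btns I T d := ⟨hPd, hmin⟩
      have hd1 : 1 ≤ d := by
        rcases Nat.eq_zero_or_pos d with h0 | h
        · exfalso
          rw [h0] at hPd
          exact hIT hPd
        · exact h
      have hdlt : d < 2 ^ I.length := pvED_lt_card hD
      rw [pvLoopA_reach btns I T d hD hd1 _ 0 (by omega) (by omega)
        _ _ _ _ (pvInit_DInv btns I) (pvInit_QInv btns I)
        (pvInit_DInv btns T) (pvInit_QInv btns T)]
      rw [pvLoopB_reach btns I T d hD hd1 _ 0 (by omega) (by omega)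
        _ _ (pvInit_DInv btns I) (pvInit_QInv btns I)]
    · push_neg at hreach
      obtain ⟨kI, hkIle, hkI⟩ := pvExists_empty_level btns I
      obtain ⟨kT, hkTle, hkT⟩ := pvExists_empty_level btns T
      rw [pvLoopA_unreach btns I T hreach kI kT hkI hkT _ 0
        (by have hmx : max kI kT ≤ max (2 ^ I.length) (2 ^ T.length) :=
              max_le_max hkIle hkTle
            have hmx2 : max (2 ^ I.length) (2 ^ T.length) ≤ 2 ^ I.length + 2 ^ T.length := by
              omega
            omega)
        _ _ _ _ (pvInit_DInv btns I) (pvInit_QInv btns I)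
        (pvInit_DInv btns T) (pvInit_QInv btns T)]
      rw [pvLoopB_unreach btns I T hreach kI hkI _ 0 (by omega)
        _ _ (pvInit_DInv btns I) (pvInit_QInv btns I)]
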